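-- pv_equiv track=rewrite | github.com/baldFemale/LeetCode-Solution | python/HashMap/Maximum Equal Frequency/Maximum Equal Frequency.py | maxEqualFreq
-- ===== SOURCE A (Python) =====
-- from collections import defaultdict
--
-- def maxEqualFreq(nums):
--     """
--     :type nums: List[int]
--     :rtype: int
--     """
--
--     cnt = defaultdict(int)
--     freq = defaultdict(int)
--     res = 0
--     maxF = 0
--
--     for i, j in enumerate(nums):
--         cnt[j] += 1
--         freq[cnt[j] - 1] -= 1
--         freq[cnt[j]] += 1
--
--         maxF = max(maxF, cnt[j])
--
--         if maxF == 1 or maxF * freq[maxF] == i or (maxF - 1) * (freq[maxF - 1] + 1) == i: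
--             res = max(res, i + 1)
--     return res
-- ===== SOURCE B (Python) =====
-- from collections import Counter
--
--
-- def _good(prefix):
--     """Can the last element of `prefix` be removed so that all remaining
--     numbers occur equally often?  (Checked from scratch on the prefix.)"""
--     cnt = Counter(prefix)
--     freq = Counter(cnt.values())
--     m = max(cnt.values())
--     L = len(prefix)
--     return m == 1 or m * freq[m] == L - 1 or (m - 1) * (freq[m - 1] + 1) == L - 1
--
--
-- def maxEqualFreq(nums):
--     """
--     :type nums: List[int]
--     :rtype: int
--     """
--     best = 0
--     for L in range(1, len(nums) + 1):
--         if _good(nums[:L]):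
--             best = L
--     return best
-- ===== Notes on version B (the rewrite author's own statement) =====
-- stated objective: simpler
-- what changed: Drops A's incremental state (running maxF and delta-updated count-of-counts dict): B re-examines each prefix independently, building its Counter, the Counter of its counts and their max from scratch, so no cross-iteration bookkeeping or defaultdict delta trickery remains.
import Mathlib
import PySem

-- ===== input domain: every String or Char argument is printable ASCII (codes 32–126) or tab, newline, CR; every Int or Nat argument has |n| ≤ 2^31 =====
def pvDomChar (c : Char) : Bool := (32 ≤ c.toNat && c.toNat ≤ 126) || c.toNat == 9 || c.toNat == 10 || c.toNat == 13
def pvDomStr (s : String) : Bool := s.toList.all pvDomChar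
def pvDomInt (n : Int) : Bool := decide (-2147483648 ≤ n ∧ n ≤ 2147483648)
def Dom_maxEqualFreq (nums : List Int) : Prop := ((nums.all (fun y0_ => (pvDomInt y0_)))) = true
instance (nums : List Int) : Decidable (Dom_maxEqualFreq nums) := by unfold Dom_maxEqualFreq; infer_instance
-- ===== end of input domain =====

-- B replaces A's incremental maxF/count-of-counts bookkeeping by an independent
-- from-scratch check of every prefix (simpler, no cross-iteration state; not faster).


-- ===== PORT A =====
def maxEqualFreq (nums : List Int) : Int :=
  ((PySem.List.enumerate nums 0).foldl
    (fun (s : PySem.Dict Int Int × PySem.Dict Int Int × Int × Int) (ij : Int × Int) =>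
      let cnt := (s.1).modify ij.2 0 (· + 1)                       -- cnt[j] += 1
      let c := cnt.getD ij.2 0                                     -- cnt[j]
      let freq := ((s.2.1).modify (c - 1) 0 (· - 1)).modify c 0 (· + 1)
      let maxF := max s.2.2.2 c                                    -- maxF = max(maxF, cnt[j])
      let res := if maxF == 1 || maxF * freq.getD maxF 0 == ij.1
                    || (maxF - 1) * (freq.getD (maxF - 1) 0 + 1) == ij.1
                 then max s.2.2.1 (ij.1 + 1) else s.2.2.1
      (cnt, freq, res, maxF))
    (PySem.Dict.empty, PySem.Dict.empty, 0, 0)).2.2.1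

-- ===== PORT B =====
-- _good(prefix): from-scratch check of one prefix (match arm 'none' is unreachable:
-- _good is only applied to nonempty prefixes, where Python's max() returns).
def altGood (pfx : List Int) : Bool :=
  let cnt := PySem.Dict.counter pfx
  let freq := PySem.Dict.counter cnt.values
  match PySem.List.max? cnt.values (fun v => v) with
  | none => false
  | some m =>
      let L : Int := pfx.length
      m == 1 || m * freq.getD m 0 == L - 1 || (m - 1) * (freq.getD (m - 1) 0 + 1) == L - 1

def maxEqualFreq_alt (nums : List Int) : Int :=
  (PySem.List.pyRange 1 ((nums.length : Int) + 1) 1).foldl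
    (fun best L => if altGood (PySem.List.slice nums none (some L)) then L else best) 0

-- ===== PRECONDITION & SPEC =====
def Spec_maxEqualFreq (nums : List Int) (out : Int) : Prop := out = maxEqualFreq_alt nums
instance (nums : List Int) (out : Int) : Decidable (Spec_maxEqualFreq nums out) := by unfold Spec_maxEqualFreq; infer_instance

-- ===== CLAIM (what is proved, stated in full; the proofs are below) =====
def Claim_equal_maxEqualFreq : Prop := ∀ (nums : List Int), Dom_maxEqualFreq nums → Spec_maxEqualFreq nums (maxEqualFreq nums)

-- ===== LEMMAS AND PROOFS =====

-- the multiset of occurrence counts of a prefix, as the list B's Counter iterates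
def pvVals (p : List Int) : List Int := (PySem.Set.ofList p).map (fun k => ((p.count k : Nat) : Int))

-- reference recursion both loops are reduced to
def pvRec : List Int → List Int → Int → Int
  | _, [], best => best
  | p, j :: rest, best =>
      pvRec (p ++ [j]) rest (if altGood (p ++ [j]) then ((p.length : Int) + 1) else best)

theorem pv_foldl_max_max (l : List Int) : ∀ b c : Int, l.foldl max (max b c) = max (l.foldl max b) c := by
  induction l with
  | nil => intro b c; rfl
  | cons x t ih =>
    intro b c
    simp only [List.foldl_cons]
    rw [show max (max b c) x = max (max b x) c from max_right_comm b c x, ih]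

-- replacing the value at one key j ∈ S by a larger value: running max
theorem pv_max_replace (S : List Int) (f g : Int → Int) (j : Int) (hS : S.Nodup) (hj : j ∈ S)
    (hfg : ∀ s ∈ S, s ≠ j → g s = f s) (hle : f j ≤ g j) (a : Int) :
    (S.map g).foldl max a = max ((S.map f).foldl max a) (g j) := by
  induction S generalizing a with
  | nil => cases hj
  | cons s t ih =>
    simp only [List.map_cons, List.foldl_cons]
    by_cases hsj : s = j
    · subst hsj
      have hst : s ∉ t := (List.nodup_cons.mp hS).1
      have hmap : t.map g = t.map f :=
        List.map_congr_left (fun x hx => hfg x (List.mem_cons_of_mem _ hx)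
          (fun h => hst (h ▸ hx)))
      rw [hmap, ← pv_foldl_max_max (t.map f) (max a (f s)) (g s)]
      congr 1
      rw [max_assoc, max_eq_right hle]
    · have hjt : j ∈ t := by
        rcases List.mem_cons.mp hj with h | h
        · exact absurd h.symm hsj
        · exact h
      rw [hfg s (List.mem_cons_self) hsj]
      exact ih (List.nodup_cons.mp hS).2 hjt
        (fun x hx hne => hfg x (List.mem_cons_of_mem _ hx) hne) (max a (f s))

-- replacing the value at one key j ∈ S: element counts
theorem pv_count_replace (S : List Int) (f g : Int → Int) (j : Int) (hS : S.Nodup) (hj : j ∈ S)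
    (hfg : ∀ s ∈ S, s ≠ j → g s = f s) (k : Int) :
    (S.map g).count k + (if k = f j then 1 else 0) = (S.map f).count k + (if k = g j then 1 else 0) := by
  induction S with
  | nil => cases hj
  | cons s t ih =>
    simp only [List.map_cons, List.count_cons, beq_iff_eq]
    by_cases hsj : s = j
    · subst hsj
      have hst : s ∉ t := (List.nodup_cons.mp hS).1
      have hmap : t.map g = t.map f :=
        List.map_congr_left (fun x hx => hfg x (List.mem_cons_of_mem _ hx)
          (fun h => hst (h ▸ hx)))
      rw [hmap]
      split_ifs <;> omega
    · have hjt : j ∈ t := by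
        rcases List.mem_cons.mp hj with h | h
        · exact absurd h.symm hsj
        · exact h
      have := ih (List.nodup_cons.mp hS).2 hjt
        (fun x hx hne => hfg x (List.mem_cons_of_mem _ hx) hne)
      rw [hfg s (List.mem_cons_self) hsj]
      split_ifs at this ⊢ <;> omega

theorem pv_vals_append_mem (p : List Int) (j : Int) (hj : j ∈ p) :
    pvVals (p ++ [j]) = (PySem.Set.ofList p).map
      (fun k => if k = j then ((p.count j : Nat) : Int) + 1 else ((p.count k : Nat) : Int)) := by
  unfold pvVals
  rw [PySem.Set.ofList_append_singleton, PySem.Set.add_of_mem (((PySem.Set.mem_ofList _ _).mpr hj))]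
  apply List.map_congr_left
  intro k _
  by_cases h : k = j
  · subst h; simp [List.count_append]
  · simp [List.count_append, h, Ne.symm h]

theorem pv_vals_append_not_mem (p : List Int) (j : Int) (hj : j ∉ p) :
    pvVals (p ++ [j]) = pvVals p ++ [1] := by
  unfold pvVals
  rw [PySem.Set.ofList_append_singleton,
    PySem.Set.add_of_not_mem (fun h => hj (((PySem.Set.mem_ofList _ _).mp h))), List.map_append]
  congr 1
  · apply List.map_congr_left
    intro k hk
    have hkj : k ≠ j := fun h => hj (h ▸ (PySem.Set.mem_ofList _ _).mp hk)
    simp [List.count_append, Ne.symm hkj]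
  · simp [List.count_append, List.count_cons, List.count_eq_zero_of_not_mem hj]

theorem pv_vals_max (p : List Int) (j : Int) :
    (pvVals (p ++ [j])).foldl max 0 = max ((pvVals p).foldl max 0) ((p.count j : Int) + 1) := by
  by_cases hj : j ∈ p
  · rw [pv_vals_append_mem p j hj]
    rw [pv_max_replace (PySem.Set.ofList p) (fun k => ((p.count k : Nat) : Int))
        (fun k => if k = j then ((p.count j : Nat) : Int) + 1 else ((p.count k : Nat) : Int)) j
        (PySem.Set.nodup_ofList p) (((PySem.Set.mem_ofList _ _).mpr hj))
        (fun s _ hs => if_neg hs) (by simp) 0]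
    simp [pvVals]
  · rw [pv_vals_append_not_mem p j hj, List.foldl_append]
    simp [List.count_eq_zero_of_not_mem hj]

theorem pv_vals_count (p : List Int) (j : Int) (k : Int) (hk : 1 ≤ k) :
    ((pvVals (p ++ [j])).count k : Int)
      = (pvVals p).count k + (if k = (p.count j : Int) + 1 then 1 else 0)
        - (if k = (p.count j : Int) then 1 else 0) := by
  by_cases hj : j ∈ p
  · rw [pv_vals_append_mem p j hj]
    have h := pv_count_replace (PySem.Set.ofList p) (fun k => ((p.count k : Nat) : Int))
      (fun k => if k = j then ((p.count j : Nat) : Int) + 1 else ((p.count k : Nat) : Int)) j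
      (PySem.Set.nodup_ofList p) (((PySem.Set.mem_ofList _ _).mpr hj))
      (fun s _ hs => if_neg hs) k
    unfold pvVals
    split_ifs at h ⊢ <;> push_cast at h ⊢ <;> omega
  · rw [pv_vals_append_not_mem p j hj]
    have h0 : p.count j = 0 := List.count_eq_zero_of_not_mem hj
    rw [List.count_append, h0]
    simp only [Nat.cast_zero, zero_add]
    rw [List.count_singleton]
    split_ifs <;> simp_all

theorem pv_counter_values (p : List Int) : (PySem.Dict.counter p).values = pvVals p := by
  show (PySem.Dict.counter p).items.map (·.2) = pvVals p
  rw [PySem.Dict.items_counter]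
  simp [pvVals, List.map_map, Function.comp]

theorem pv_counter_append (p : List Int) (j : Int) :
    PySem.Dict.counter (p ++ [j]) = (PySem.Dict.counter p).modify j 0 (· + 1) := by
  rw [PySem.Dict.counter_eq_foldl, PySem.Dict.counter_eq_foldl, List.foldl_append]
  rfl

-- altGood on a nonempty prefix, in terms of pvVals
theorem pv_altGood (p : List Int) (hp : p ≠ []) :
    altGood p = (let m := (pvVals p).foldl max 0
                 let F := fun k => ((pvVals p).count k : Int)
                 m == 1 || m * F m == (p.length : Int) - 1
                   || (m - 1) * (F (m - 1) + 1) == (p.length : Int) - 1) := by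
  have hne : pvVals p ≠ [] := by
    unfold pvVals
    simp only [ne_eq, List.map_eq_nil_iff]
    intro h
    obtain ⟨x, t, rfl⟩ := List.exists_cons_of_ne_nil hp
    have hx : x ∈ PySem.Set.ofList (x :: t) := (PySem.Set.mem_ofList _ _).mpr List.mem_cons_self
    rw [h] at hx
    cases hx
  obtain ⟨v, t, hvt⟩ := List.exists_cons_of_ne_nil hne
  have hv0 : 0 ≤ v := by
    have hv : v ∈ pvVals p := hvt ▸ List.mem_cons_self
    obtain ⟨k, -, rfl⟩ := List.mem_map.mp hv
    exact Int.natCast_nonneg _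
  unfold altGood
  dsimp only
  rw [pv_counter_values, hvt, PySem.List.max?_id_cons]
  simp only [PySem.Dict.getD_counter, List.foldl_cons, max_eq_right hv0]

-- the main invariant for A's loop
theorem pv_A_loop (rest : List Int) : ∀ (p : List Int) (freq : PySem.Dict Int Int) (res maxF : Int),
    (∀ k : Int, 1 ≤ k → freq.getD k 0 = ((pvVals p).count k : Int)) →
    maxF = (pvVals p).foldl max 0 →
    res ≤ (p.length : Int) →
    ((PySem.List.enumerate rest (p.length : Int)).foldl
      (fun (s : PySem.Dict Int Int × PySem.Dict Int Int × Int × Int) (ij : Int × Int) =>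
        let cnt := (s.1).modify ij.2 0 (· + 1)
        let c := cnt.getD ij.2 0
        let freq := ((s.2.1).modify (c - 1) 0 (· - 1)).modify c 0 (· + 1)
        let maxF := max s.2.2.2 c
        let res := if maxF == 1 || maxF * freq.getD maxF 0 == ij.1
                      || (maxF - 1) * (freq.getD (maxF - 1) 0 + 1) == ij.1
                   then max s.2.2.1 (ij.1 + 1) else s.2.2.1
        (cnt, freq, res, maxF))
      (PySem.Dict.counter p, freq, res, maxF)).2.2.1 = pvRec p rest res := by
  induction rest with
  | nil => intro p freq res maxF _ _ _; rfl
  | cons j rest' ih =>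
    intro p freq res maxF hfreq hmax hres
    rw [PySem.List.enumerate_cons]
    simp only [List.foldl_cons]
    rw [← pv_counter_append p j]
    have hc : (PySem.Dict.counter (p ++ [j])).getD j 0 = (p.count j : Int) + 1 := by
      rw [PySem.Dict.getD_counter]
      simp [List.count_append]
    rw [hc]
    rw [show ((p.count j : Int) + 1 - 1) = ((p.count j : Int)) from by ring]
    have hfreq' : ∀ k : Int, 1 ≤ k →
        ((freq.modify ((p.count j : Int)) 0 (· - 1)).modify ((p.count j : Int) + 1) 0 (· + 1)).getD k 0
          = ((pvVals (p ++ [j])).count k : Int) := by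
      intro k hk
      have hA := hfreq k hk
      have hB := hfreq ((p.count j : Int) + 1) (by omega)
      have hvc := pv_vals_count p j k hk
      simp only [PySem.Dict.getD_modify]
      rw [hvc]
      by_cases h1 : k = (p.count j : Int) + 1
      · subst h1
        simp only [if_true, if_neg (show ¬((p.count j : Int) + 1 = (p.count j : Int)) from by omega)]
        omega
      · by_cases h2 : k = (p.count j : Int)
        · subst h2
          simp only [if_neg h1, if_true]
          omega
        · simp only [if_neg h1, if_neg h2]
          omega
    have hmax' : max maxF ((p.count j : Int) + 1) = (pvVals (p ++ [j])).foldl max 0 := by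
      rw [pv_vals_max, ← hmax]
    have hcond :
        (max maxF ((p.count j : Int) + 1) == 1
          || max maxF ((p.count j : Int) + 1)
              * ((freq.modify ((p.count j : Int)) 0 (· - 1)).modify ((p.count j : Int) + 1) 0
                  (· + 1)).getD (max maxF ((p.count j : Int) + 1)) 0 == (p.length : Int)
          || (max maxF ((p.count j : Int) + 1) - 1)
              * (((freq.modify ((p.count j : Int)) 0 (· - 1)).modify ((p.count j : Int) + 1) 0
                  (· + 1)).getD (max maxF ((p.count j : Int) + 1) - 1) 0 + 1) == (p.length : Int))
        = altGood (p ++ [j]) := by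
      rw [pv_altGood (p ++ [j]) (by simp)]
      dsimp only
      rw [← hmax']
      have hlen' : ((p ++ [j]).length : Int) - 1 = (p.length : Int) := by
        simp
      rw [hlen']
      by_cases hM1 : max maxF ((p.count j : Int) + 1) = 1
      · simp [hM1]
      · have h0 : 0 ≤ maxF := hmax ▸ (PySem.List.le_foldl_max (pvVals p) 0).1
        have h2 : 2 ≤ max maxF ((p.count j : Int) + 1) := by
          have h1 : ((p.count j : Int) + 1) ≤ max maxF ((p.count j : Int) + 1) := le_max_right _ _
          have h0' : maxF ≤ max maxF ((p.count j : Int) + 1) := le_max_left _ _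
          omega
        rw [hfreq' _ (by omega), hfreq' _ (by omega)]
    rw [hcond, max_eq_right (by omega : res ≤ (p.length : Int) + 1)]
    have hres' : (if altGood (p ++ [j]) then ((p.length : Int) + 1) else res) ≤ (((p ++ [j]).length : Int)) := by
      have : (((p ++ [j]).length : Int)) = (p.length : Int) + 1 := by simp
      split_ifs <;> omega
    have htrans := ih (p ++ [j])
      ((freq.modify ((p.count j : Int)) 0 (· - 1)).modify ((p.count j : Int) + 1) 0 (· + 1))
      (if altGood (p ++ [j]) then ((p.length : Int) + 1) else res)
      (max maxF ((p.count j : Int) + 1)) hfreq' hmax' hres'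
    rw [show ((p ++ [j]).length : Int) = (p.length : Int) + 1 from by simp] at htrans
    rw [show pvRec p (j :: rest') res
        = pvRec (p ++ [j]) rest' (if altGood (p ++ [j]) then ((p.length : Int) + 1) else res)
      from rfl]
    exact htrans

-- B's range loop is the reference recursion
theorem pv_B_loop (nums : List Int) : ∀ (rest p : List Int) (best : Int), nums = p ++ rest →
    (PySem.List.pyRange ((p.length : Int) + 1) ((nums.length : Int) + 1) 1).foldl
      (fun b L => if altGood (PySem.List.slice nums none (some L)) then L else b) best
    = pvRec p rest best := by
  intro rest
  induction rest with
  | nil =>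
    intro p best h
    have hp : p = nums := by simp [h]
    subst hp
    rw [PySem.List.pyRange_one_eq_nil (le_refl _)]
    rfl
  | cons j rest' ih =>
    intro p best h
    have hlen : nums.length = p.length + 1 + rest'.length := by
      rw [h]; simp; omega
    rw [PySem.List.pyRange_one_cons (by push_cast [hlen]; omega)]
    simp only [List.foldl_cons]
    have hslice : PySem.List.slice nums none (some ((p.length : Int) + 1)) = p ++ [j] := by
      rw [PySem.List.slice_to (xs := nums) (b := (p.length : Int) + 1) (by positivity)]
      have h1 : ((p.length : Int) + 1).toNat = p.length + 1 := by omega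
      rw [h1, h, show p ++ j :: rest' = (p ++ [j]) ++ rest' by simp,
        show p.length + 1 = (p ++ [j]).length by simp]
      exact List.take_left
    rw [hslice]
    have hrec := ih (p ++ [j]) (if altGood (p ++ [j]) then ((p.length : Int) + 1) else best)
      (by simp [h])
    have hcast : ((p ++ [j]).length : Int) = (p.length : Int) + 1 := by simp
    rw [hcast] at hrec
    exact hrec

-- ===== VERDICT (by name: the statement is the Claim_ definition above) =====
theorem maxEqualFreq_spec : Claim_equal_maxEqualFreq := by
  intro nums _
  show maxEqualFreq nums = maxEqualFreq_alt nums
  have hA := pv_A_loop nums [] PySem.Dict.empty 0 0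
    (by intro k _; simp [pvVals, PySem.Dict.getD_empty])
    (by simp [pvVals])
    (by simp)
  have hB := pv_B_loop nums nums [] 0 rfl
  simp only [List.length_nil, Nat.cast_zero, zero_add] at hA hB
  unfold maxEqualFreq maxEqualFreq_alt
  exact hA.trans hB.symm
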